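-- pv_equiv track=rewrite | github.com/joshanashakya/dissertation | workspace/dataset/java-python/GeeksForGeeks/2350/A/2.py | maxOnesIndex
-- ===== SOURCE A (Python) =====
-- def maxOnesIndex(arr, n):
--
--     i = 0
--
--     # To store count of ones on left
--     # side of current element zero
--     leftCnt = 0
--
--     # To store count of ones on right
--     # side of current element zero
--     rightCnt = 0
--
--     # Index of zero with maximum number
--     # of ones around it.
--     maxIndex = -1
--
--     # Index of last zero element seen
--     lastInd = -1
--
--     # Count of ones if zero at index
--     # maxInd is replaced by one.
--     maxCnt = 0
--
--     while i < n:
--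
--         # Keep incrementing count until
--         # current element is 1.
--         if arr[i] == 1:
--             rightCnt += 1
--
--         else:
--             # If current zero element
--             # is not first zero element,
--             # then count number of ones
--             # obtained by replacing zero at
--             # index lastInd. Update maxCnt
--             # and maxIndex if required.
--             if lastInd != -1:
--                 if rightCnt + leftCnt + 1 > maxCnt:
--                     maxCnt = leftCnt + rightCnt + 1
--                     maxIndex = lastInd
--
--             lastInd = i
--             leftCnt = rightCnt
--             rightCnt = 0
--
--         i += 1
--
--     # Find number of ones in continuous
--     # sequence when last zero element is
--     # replaced by one.
--     if lastInd != -1: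
--         if leftCnt + rightCnt + 1 > maxCnt:
--             maxCnt = leftCnt + rightCnt + 1
--             maxIndex = lastInd
--
--     return maxIndex
-- ===== SOURCE B (Python) =====
-- def maxOnesIndex(arr, n):
--     zeros = [i for i in range(n) if arr[i] != 1]
--     best_idx = -1
--     best_len = 0
--     prev = -1
--     for k, z in enumerate(zeros):
--         nxt = zeros[k + 1] if k + 1 < len(zeros) else n
--         length = nxt - prev - 1
--         if length > best_len:
--             best_len = length
--             best_idx = z
--         prev = z
--     return best_idx
-- ===== Notes on version B (the rewrite author's own statement) =====
-- stated objective: simpler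
-- what changed: B first collects the list of zero positions (any value != 1) in one comprehension, then computes each flipped run directly as next_zero - prev_zero - 1 with sentinels -1 and n, instead of A's single stateful scan carrying left/right one-counters and a last-zero register.
import Mathlib
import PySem

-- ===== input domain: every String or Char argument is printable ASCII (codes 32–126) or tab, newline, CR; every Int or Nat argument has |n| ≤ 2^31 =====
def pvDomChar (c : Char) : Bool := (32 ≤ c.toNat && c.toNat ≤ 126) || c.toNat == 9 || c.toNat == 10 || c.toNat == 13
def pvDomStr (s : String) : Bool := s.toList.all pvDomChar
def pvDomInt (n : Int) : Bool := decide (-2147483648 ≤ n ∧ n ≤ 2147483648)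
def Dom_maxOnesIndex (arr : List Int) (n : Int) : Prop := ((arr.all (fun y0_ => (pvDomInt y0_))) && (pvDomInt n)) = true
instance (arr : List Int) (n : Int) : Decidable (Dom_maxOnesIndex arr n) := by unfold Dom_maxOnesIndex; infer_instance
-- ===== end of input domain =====

-- B replaces A's stateful one-counter scan by collecting the zero positions and
-- computing each flipped run as next_zero - prev_zero - 1 with sentinels (simpler).

-- ===== PORT A =====
-- A's while-loop; state (leftCnt, rightCnt, maxIndex, lastInd, maxCnt).
-- `pyGet?` = none is Python's IndexError; Pre_ excludes it, 0 there is dead code.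
def maxOnesIndexLoop (arr : List Int) (n i leftCnt rightCnt maxIndex lastInd maxCnt : Int) : Int :=
  if h : i < n then
    match PySem.List.pyGet? arr i with
    | none => 0
    | some v =>
      if v == 1 then
        maxOnesIndexLoop arr n (i + 1) leftCnt (rightCnt + 1) maxIndex lastInd maxCnt
      else
        if lastInd ≠ -1 ∧ rightCnt + leftCnt + 1 > maxCnt then
          maxOnesIndexLoop arr n (i + 1) rightCnt 0 lastInd i (leftCnt + rightCnt + 1)
        else
          maxOnesIndexLoop arr n (i + 1) rightCnt 0 maxIndex i maxCnt
  else
    if lastInd ≠ -1 ∧ leftCnt + rightCnt + 1 > maxCnt then lastInd else maxIndex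
termination_by (n - i).toNat
decreasing_by all_goals omega

def maxOnesIndex (arr : List Int) (n : Int) : Int :=
  maxOnesIndexLoop arr n 0 0 0 (-1) (-1) 0

-- ===== PORT B =====
-- zeros = [i for i in range(n) if arr[i] != 1]  (arr[i] IndexError excluded by Pre_)
def zerosOf (arr : List Int) (n : Int) : List Int :=
  (PySem.List.pyRange 0 n 1).filter (fun i => (PySem.List.pyGet? arr i).getD 0 != 1)

-- the for-loop over `zeros`: nxt = following zero or n; length = nxt - prev - 1
def bestZero (zeros : List Int) (n prev bestIdx bestLen : Int) : Int :=
  match zeros with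
  | [] => bestIdx
  | z :: rest =>
    let nxt := match rest with | [] => n | z2 :: _ => z2
    let length := nxt - prev - 1
    if length > bestLen then bestZero rest n z z length
    else bestZero rest n z bestIdx bestLen

def maxOnesIndex_alt (arr : List Int) (n : Int) : Int :=
  bestZero (zerosOf arr n) n (-1) (-1) 0

-- ===== PRECONDITION & SPEC =====
-- Pre_ excludes exactly the inputs where A raises IndexError: n larger than len(arr).
def Pre_maxOnesIndex (arr : List Int) (n : Int) : Prop := n ≤ (arr.length : Int)
instance (arr : List Int) (n : Int) : Decidable (Pre_maxOnesIndex arr n) := by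
  unfold Pre_maxOnesIndex; infer_instance

def pvWitness_maxOnesIndex : List Int × Int := ([1, 0, 1, 1, 0, 1], 6)

def Spec_maxOnesIndex (arr : List Int) (n : Int) (out : Int) : Prop := out = maxOnesIndex_alt arr n
instance (arr : List Int) (n : Int) (out : Int) : Decidable (Spec_maxOnesIndex arr n out) := by unfold Spec_maxOnesIndex; infer_instance

-- ===== CLAIM (what is proved, stated in full; the proofs are below) =====
def Claim_equal_maxOnesIndex : Prop := ∀ (arr : List Int) (n : Int), Dom_maxOnesIndex arr n → Pre_maxOnesIndex arr n → Spec_maxOnesIndex arr n (maxOnesIndex arr n)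

-- ===== LEMMAS AND PROOFS =====

-- zeros of the remaining range [i, n)
def zerosFrom (arr : List Int) (i n : Int) : List Int :=
  (PySem.List.pyRange i n 1).filter (fun j => (PySem.List.pyGet? arr j).getD 0 != 1)

theorem zerosFrom_nil (arr : List Int) (i n : Int) (h : n ≤ i) : zerosFrom arr i n = [] := by
  unfold zerosFrom
  rw [PySem.List.pyRange_one_eq_nil h]
  rfl

theorem zerosFrom_step (arr : List Int) (i n : Int) (h : i < n) :
    zerosFrom arr i n =
      (if (PySem.List.pyGet? arr i).getD 0 != 1 then [i] else []) ++ zerosFrom arr (i + 1) n := by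
  unfold zerosFrom
  rw [PySem.List.pyRange_one_cons h, List.filter_cons]
  split <;> simp_all

-- Main invariant: the A-loop from index i equals the B-scan over the remaining
-- zeros, with the pending last zero (if any) prepended and prev reconstructed.
theorem loop_invariant (arr : List Int) (n i leftCnt rightCnt maxIndex lastInd maxCnt : Int)
    (hPre : n ≤ (arr.length : Int)) (hi : 0 ≤ i)
    (hright : rightCnt = i - lastInd - 1)
    (hin : i ≤ n ∨ lastInd = -1)
    (hcase : (lastInd = -1) ∨ (0 ≤ lastInd)) :
    maxOnesIndexLoop arr n i leftCnt rightCnt maxIndex lastInd maxCnt =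
      bestZero (if lastInd = -1 then zerosFrom arr i n else lastInd :: zerosFrom arr i n) n
        (if lastInd = -1 then -1 else lastInd - leftCnt - 1) maxIndex maxCnt := by
  by_cases h : i < n
  · have hv : PySem.List.pyGet? arr i = some arr[i.toNat] := by
      rw [PySem.List.pyGet?_of_nonneg _ hi, List.getElem?_eq_getElem (by omega)]
    rw [maxOnesIndexLoop, dif_pos h]
    simp only [hv]
    have hz := zerosFrom_step arr i n h
    rw [hv] at hz
    by_cases hone : arr[i.toNat] = 1
    · -- arr[i] == 1
      have hznz : zerosFrom arr i n = zerosFrom arr (i + 1) n := by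
        rw [hz]; simp [hone]
      rw [if_pos (by simp [hone]), hznz]
      exact loop_invariant arr n (i+1) leftCnt (rightCnt+1) maxIndex lastInd maxCnt hPre
        (by omega) (by omega) (Or.inl (by omega)) hcase
    · -- arr[i] != 1 : i is a zero
      have hzc : zerosFrom arr i n = i :: zerosFrom arr (i + 1) n := by
        rw [hz]; simp [hone]
      rw [if_neg (by simp [hone]), hzc]
      rcases hcase with hL | hL
      · -- first zero ever seen
        subst hL
        rw [if_neg (by omega)]
        rw [loop_invariant arr n (i+1) rightCnt 0 maxIndex i maxCnt hPre (by omega) (by omega)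
              (Or.inl (by omega)) (Or.inr (by omega))]
        rw [if_pos rfl, if_pos rfl, if_neg (by omega), if_neg (by omega)]
        rw [show i - rightCnt - 1 = -1 by omega]
      · -- a previous zero lastInd exists: bestZero examines it with nxt = i
        have hne : ¬ lastInd = -1 := by omega
        simp only [if_neg hne]
        rw [bestZero]
        rw [show i - (lastInd - leftCnt - 1) - 1 = rightCnt + leftCnt + 1 by omega]
        by_cases hgt : rightCnt + leftCnt + 1 > maxCnt
        · rw [if_pos ⟨hne, hgt⟩, if_pos hgt]
          rw [loop_invariant arr n (i+1) rightCnt 0 lastInd i (leftCnt + rightCnt + 1) hPre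
                (by omega) (by omega) (Or.inl (by omega)) (Or.inr (by omega))]
          rw [if_neg (by omega), if_neg (by omega)]
          rw [show i - rightCnt - 1 = lastInd by omega,
              show rightCnt + leftCnt + 1 = leftCnt + rightCnt + 1 by ring]
        · rw [if_neg (by omega), if_neg hgt]
          rw [loop_invariant arr n (i+1) rightCnt 0 maxIndex i maxCnt hPre
                (by omega) (by omega) (Or.inl (by omega)) (Or.inr (by omega))]
          rw [if_neg (by omega), if_neg (by omega)]
          rw [show i - rightCnt - 1 = lastInd by omega]
  · -- i ≥ n : both finish
    rw [maxOnesIndexLoop, dif_neg h]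
    rcases hcase with hL | hL
    · subst hL
      rw [if_pos rfl, zerosFrom_nil arr i n (by omega), if_neg (by omega), bestZero]
    · have hne : ¬ lastInd = -1 := by omega
      have hieq : i = n := by omega
      simp only [if_neg hne]
      rw [zerosFrom_nil arr i n (by omega), bestZero]
      rw [show n - (lastInd - leftCnt - 1) - 1 = leftCnt + rightCnt + 1 by omega]
      by_cases hgt : leftCnt + rightCnt + 1 > maxCnt
      · rw [if_pos ⟨hne, hgt⟩, if_pos hgt, bestZero]
      · rw [if_neg (by omega), if_neg hgt, bestZero]
termination_by (n - i).toNat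
decreasing_by all_goals omega

-- ===== VERDICT (by name: the statement is the Claim_ definition above) =====
theorem maxOnesIndex_spec : Claim_equal_maxOnesIndex := by
  intro arr n _ hPre
  unfold Spec_maxOnesIndex maxOnesIndex maxOnesIndex_alt
  have h := loop_invariant arr n 0 0 0 (-1) (-1) 0 hPre (by omega) (by omega) (Or.inr rfl)
    (Or.inl rfl)
  simpa [zerosFrom, zerosOf] using h
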